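-- pv_equiv track=rewrite | github.com/MForofontov/python_utils | iterable_functions/list_operations/check_if_all_elements_are_duplicates.py | check_if_all_elements_are_duplicates
-- ===== SOURCE A (Python) =====
-- from collections import Counter
-- from typing import TypeVar
--
-- T = TypeVar("T")
--
-- def check_if_all_elements_are_duplicates(input_list: list[T]) -> bool:
--     """
--     Check if all elements in the list are duplicates.
--
--     Parameters
--     ----------
--     input_list : list[T]
--         The list to check for duplicate elements.
--
--     Returns
--     -------
--     bool
--         True if every element in the list occurs more than once, False otherwise.
--         Returns False if the list is empty.
--
--     Raises
--     ------
--     TypeError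
--         If input_list is not a list.
--     """
--     if not isinstance(input_list, list):
--         raise TypeError("input_list must be a list")
--
--     element_counts = Counter(
--         tuple(element) if isinstance(element, list) else element
--         for element in input_list
--     )
--
--     return (
--         all(count > 1 for count in element_counts.values()) if element_counts else False
--     )
-- ===== SOURCE B (Python) =====
-- def check_if_all_elements_are_duplicates(input_list):
--     """Single pass: track values seen exactly once vs. seen more than once;
--     True iff the list is non-empty and nothing remains in seen_once."""
--     if not isinstance(input_list, list):
--         raise TypeError("input_list must be a list")
--     seen_once = set()
--     seen_more = set()
--     for element in input_list:
--         v = tuple(element) if isinstance(element, list) else element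
--         if v in seen_once:
--             seen_once.discard(v)
--             seen_more.add(v)
--         elif v not in seen_more:
--             seen_once.add(v)
--     return bool(input_list) and not seen_once
-- ===== Notes on version B (the rewrite author's own statement) =====
-- stated objective: alternative
-- what changed: Replaces the Counter table plus all()-over-counts pass with one streaming pass that moves each value between a seen-exactly-once set and a seen-more-than-once set, answering from the emptiness of the first set.
import Mathlib
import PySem

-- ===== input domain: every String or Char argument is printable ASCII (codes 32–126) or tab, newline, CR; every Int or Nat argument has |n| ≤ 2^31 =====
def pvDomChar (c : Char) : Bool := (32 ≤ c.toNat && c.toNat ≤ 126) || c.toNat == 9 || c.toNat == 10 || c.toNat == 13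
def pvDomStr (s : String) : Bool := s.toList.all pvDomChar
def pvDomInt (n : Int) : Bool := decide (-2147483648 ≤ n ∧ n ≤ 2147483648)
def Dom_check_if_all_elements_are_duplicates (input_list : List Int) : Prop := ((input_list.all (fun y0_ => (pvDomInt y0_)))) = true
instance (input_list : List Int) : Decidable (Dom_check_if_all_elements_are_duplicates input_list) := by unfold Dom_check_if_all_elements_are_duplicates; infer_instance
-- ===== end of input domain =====

-- B replaces A's Counter + all()-over-counts with one pass moving values between a
-- seen-exactly-once set and a seen-more-than-once set (objective: alternative).

-- ===== PORT A =====
-- Counter(...) then 'all(count > 1 for count in values) if element_counts else False'.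
-- (Elements are Int here, so the 'tuple(element) if isinstance(element, list)' normalization is the identity.)
def check_if_all_elements_are_duplicates (input_list : List Int) : Bool :=
  let element_counts : PySem.Dict Int Int := PySem.Dict.counter input_list
  if element_counts.size ≠ 0 then element_counts.values.all (fun count => decide (count > 1))
  else false

-- ===== PORT B =====
def check_if_all_elements_are_duplicates_alt (input_list : List Int) : Bool :=
  let st : PySem.Set Int × PySem.Set Int :=
    input_list.foldl
      (fun (p : PySem.Set Int × PySem.Set Int) v =>
        if PySem.Set.contains p.1 v then (PySem.Set.discard p.1 v, PySem.Set.add p.2 v)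
        else if PySem.Set.contains p.2 v then p
        else (PySem.Set.add p.1 v, p.2))
      (PySem.Set.empty, PySem.Set.empty)
  decide (input_list ≠ []) && decide (st.1 = [])

-- ===== PRECONDITION & SPEC =====
def Spec_check_if_all_elements_are_duplicates (input_list : List Int) (out : Bool) : Prop := out = check_if_all_elements_are_duplicates_alt input_list
instance (input_list : List Int) (out : Bool) : Decidable (Spec_check_if_all_elements_are_duplicates input_list out) := by unfold Spec_check_if_all_elements_are_duplicates; infer_instance

-- ===== CLAIM (what is proved, stated in full; the proofs are below) =====
def Claim_equal_check_if_all_elements_are_duplicates : Prop := ∀ (input_list : List Int), Dom_check_if_all_elements_are_duplicates input_list → Spec_check_if_all_elements_are_duplicates input_list (check_if_all_elements_are_duplicates input_list)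

-- ===== LEMMAS AND PROOFS =====

-- B's loop body, named for the lemmas below.
def pvStep (p : PySem.Set Int × PySem.Set Int) (v : Int) : PySem.Set Int × PySem.Set Int :=
  if PySem.Set.contains p.1 v then (PySem.Set.discard p.1 v, PySem.Set.add p.2 v)
  else if PySem.Set.contains p.2 v then p
  else (PySem.Set.add p.1 v, p.2)

-- Loop invariant: s1 holds exactly the values seen once so far, s2 those seen at least twice.
def pvGood (pre : List Int) (p : PySem.Set Int × PySem.Set Int) : Prop :=
  ∀ v : Int, (v ∈ p.1 ↔ pre.count v = 1) ∧ (v ∈ p.2 ↔ 2 ≤ pre.count v)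

lemma pvStep_good (pre : List Int) (p : PySem.Set Int × PySem.Set Int) (x : Int)
    (h : pvGood pre p) : pvGood (pre ++ [x]) (pvStep p x) := by
  intro v
  have hcnt : (pre ++ [x]).count v = pre.count v + (if v = x then 1 else 0) := by
    rcases eq_or_ne v x with rfl | hne
    · simp [List.count_append]
    · simp [List.count_append, hne, Ne.symm hne]
  obtain ⟨h1, h2⟩ := h v
  obtain ⟨hx1, hx2⟩ := h x
  by_cases hc1 : x ∈ p.1
  · have hc1t : PySem.Set.contains p.1 x = true := (PySem.Set.contains_iff p.1 x).mpr hc1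
    have hx : pre.count x = 1 := hx1.mp hc1
    simp only [pvStep, hc1t, if_true]
    constructor
    · rw [PySem.Set.mem_discard, h1, hcnt]
      rcases eq_or_ne v x with rfl | hne
      · simp [hx]
      · simp [hne]
    · rw [PySem.Set.mem_add, h2, hcnt]
      rcases eq_or_ne v x with rfl | hne
      · simp [hx]
      · simp [hne]
  · have hc1f : ¬ (PySem.Set.contains p.1 x = true) :=
      fun hh => hc1 ((PySem.Set.contains_iff p.1 x).mp hh)
    by_cases hc2 : x ∈ p.2
    · have hc2t : PySem.Set.contains p.2 x = true := (PySem.Set.contains_iff p.2 x).mpr hc2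
      have hx : 2 ≤ pre.count x := hx2.mp hc2
      simp only [pvStep, if_neg hc1f, hc2t, if_true]
      constructor
      · rw [h1, hcnt]
        rcases eq_or_ne v x with rfl | hne
        · omega
        · simp [hne]
      · rw [h2, hcnt]
        rcases eq_or_ne v x with rfl | hne
        · omega
        · simp [hne]
    · have hc2f : ¬ (PySem.Set.contains p.2 x = true) :=
        fun hh => hc2 ((PySem.Set.contains_iff p.2 x).mp hh)
      have hx0 : pre.count x = 0 := by
        have hne1 : pre.count x ≠ 1 := fun hh => hc1 (hx1.mpr hh)
        have hlt : ¬ 2 ≤ pre.count x := fun hh => hc2 (hx2.mpr hh)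
        omega
      simp only [pvStep, if_neg hc1f, if_neg hc2f]
      constructor
      · rw [PySem.Set.mem_add, h1, hcnt]
        rcases eq_or_ne v x with rfl | hne
        · simp [hx0]
        · simp [hne]
      · rw [h2, hcnt]
        rcases eq_or_ne v x with rfl | hne
        · simp [hx0]
        · simp [hne]

lemma pvFoldl_good : ∀ (xs pre : List Int) (p : PySem.Set Int × PySem.Set Int),
    pvGood pre p → pvGood (pre ++ xs) (xs.foldl pvStep p) := by
  intro xs
  induction xs with
  | nil => intro pre p h; simpa using h
  | cons x t ih =>
    intro pre p h
    have := ih (pre ++ [x]) (pvStep p x) (pvStep_good pre p x h)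
    simpa using this

lemma pvGood_final (xs : List Int) : pvGood xs (xs.foldl pvStep ([], [])) := by
  have h0 : pvGood [] (([], []) : PySem.Set Int × PySem.Set Int) := by
    intro v; simp
  simpa using pvFoldl_good xs [] ([], []) h0

-- A's result characterized: non-empty input and every element's count at least 2.
lemma pvA_char (xs : List Int) :
    check_if_all_elements_are_duplicates xs =
      (decide (xs ≠ []) && decide (∀ v ∈ xs, 2 ≤ xs.count v)) := by
  show (if (PySem.Dict.counter xs).size ≠ 0 then
          (PySem.Dict.counter xs).values.all (fun count => decide (count > 1))
        else false) = _
  have hvals : (PySem.Dict.counter xs).values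
      = (PySem.Set.ofList xs).map (fun k => (xs.count k : Int)) := by
    show ((PySem.Dict.counter xs).items).map (·.2) = _
    rw [PySem.Dict.items_counter]
    simp
  have hsize : (PySem.Dict.counter xs).size = (PySem.Set.ofList xs).length := by
    show ((PySem.Dict.counter xs).items).length = _
    rw [PySem.Dict.items_counter]
    simp
  rcases eq_or_ne xs [] with rfl | hnil
  · decide
  · have hne : (PySem.Set.ofList xs).length ≠ 0 := by
      rcases List.exists_mem_of_ne_nil xs hnil with ⟨a, ha⟩
      have hmem : a ∈ PySem.Set.ofList xs := (PySem.Set.mem_ofList xs a).mpr ha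
      intro h
      rw [List.length_eq_zero_iff] at h
      simp [h] at hmem
    rw [hsize, if_pos hne, hvals]
    rw [Bool.eq_iff_iff]
    simp only [List.all_eq_true, List.mem_map, Bool.and_eq_true, decide_eq_true_eq,
      forall_exists_index, and_imp]
    constructor
    · intro h
      refine ⟨hnil, fun v hv => ?_⟩
      have := h _ v ((PySem.Set.mem_ofList xs v).mpr hv) rfl
      have : (1 : Int) < (xs.count v : Int) := this
      exact_mod_cast this
    · rintro ⟨-, h⟩ c v hv rfl
      have h2 : 2 ≤ xs.count v := h v ((PySem.Set.mem_ofList xs v).mp hv)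
      show (1 : Int) < (xs.count v : Int)
      exact_mod_cast h2

-- ===== VERDICT (by name: the statement is the Claim_ definition above) =====
theorem check_if_all_elements_are_duplicates_spec : Claim_equal_check_if_all_elements_are_duplicates := by
  intro xs _
  show check_if_all_elements_are_duplicates xs = check_if_all_elements_are_duplicates_alt xs
  rw [pvA_char]
  show _ = (decide (xs ≠ []) && decide ((xs.foldl pvStep ([], [])).1 = []))
  congr 1
  rw [decide_eq_decide]
  have hg := pvGood_final xs
  constructor
  · intro h
    apply List.eq_nil_iff_forall_not_mem.mpr
    intro v hv
    have h1 : xs.count v = 1 := ((hg v).1).mp hv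
    have hmem : v ∈ xs := List.one_le_count_iff.mp (by omega)
    have := h v hmem
    omega
  · intro h v hv
    have hnotin : v ∉ (xs.foldl pvStep ([], [])).1 := by simp [h]
    have hne1 : xs.count v ≠ 1 := fun h1 => hnotin (((hg v).1).mpr h1)
    have hpos : 1 ≤ xs.count v := List.one_le_count_iff.mpr hv
    omega
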